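-- pv_equiv track=rewrite | github.com/Mega-Sim/SCCB_Automation | conf_table_read.py | _compose_columns
-- ===== SOURCE A (Python) =====
-- from typing import List, Optional, Tuple, Dict, Any
--
-- def _compose_columns(header_grid: List[List[str]]) -> List[str]:
--     """
--     컬럼별로 위->아래 헤더 텍스트를 모아서 합성 컬럼명 생성
--     """
--     if not header_grid:
--         return []
--     nrows = len(header_grid)
--     ncols = len(header_grid[0])
--
--     cols = []
--     for c in range(ncols):
--         parts = []
--         for r in range(nrows):
--             t = (header_grid[r][c] or "").strip()
--             if t and (not parts or parts[-1] != t):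
--                 parts.append(t)
--         cols.append(" / ".join(parts))
--     return cols
-- ===== SOURCE B (Python) =====
-- from typing import List
--
-- def _compose_columns(header_grid: List[List[str]]) -> List[str]:
--     # Single row-major streaming pass: per column keep (composed string so far, last kept token).
--     if not header_grid:
--         return []
--     state = [("", "")] * len(header_grid[0])
--     for row in header_grid:
--         new_state = []
--         for (acc, last), cell in zip(state, row):
--             t = (cell or "").strip()
--             if t and t != last:
--                 acc = acc + " / " + t if acc else t
--                 last = t
--             new_state.append((acc, last))
--         state = new_state
--     return [acc for acc, _ in state]
-- ===== Notes on version B (the rewrite author's own statement) =====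
-- stated objective: alternative
-- what changed: Replaces A's column-major nested loops (collect a parts list per column, then ' / '.join) with a single row-major streaming pass that carries per-column state (composed string so far, last kept token) and builds each name by direct string concatenation, never materialising a parts list or calling join.
import Mathlib
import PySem

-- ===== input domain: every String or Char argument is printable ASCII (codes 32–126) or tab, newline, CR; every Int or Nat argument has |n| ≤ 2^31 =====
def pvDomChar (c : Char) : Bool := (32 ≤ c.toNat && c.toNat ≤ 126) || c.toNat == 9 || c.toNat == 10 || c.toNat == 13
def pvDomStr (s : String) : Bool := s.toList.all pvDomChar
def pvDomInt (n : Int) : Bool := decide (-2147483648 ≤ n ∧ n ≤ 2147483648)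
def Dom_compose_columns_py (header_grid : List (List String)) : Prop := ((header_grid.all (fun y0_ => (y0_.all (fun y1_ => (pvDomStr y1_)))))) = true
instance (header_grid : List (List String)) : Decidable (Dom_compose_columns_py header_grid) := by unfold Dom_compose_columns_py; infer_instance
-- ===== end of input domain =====

-- B is a single row-major streaming pass carrying per-column (composed string, last kept token) state instead of A's column-major parts-list + join.

-- ===== PORT A =====
-- A's inner-loop step: append stripped cell t unless empty or equal to parts[-1]
def aStep (parts : List String) (t : String) : List String :=
  if t ≠ "" ∧ (parts = [] ∨ PySem.List.pyGetD parts (-1) "" ≠ t) then parts ++ [t] else parts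

def compose_columns_py (header_grid : List (List String)) : List String :=
  if header_grid = [] then []
  else
    let nrows := header_grid.length
    let ncols := (header_grid.headD []).length
    (PySem.List.pyRange 0 (ncols : Int) 1).foldl (fun cols c =>
      let parts := (PySem.List.pyRange 0 (nrows : Int) 1).foldl (fun parts r =>
        let t := PySem.Str.strip (PySem.List.pyGetD (PySem.List.pyGetD header_grid r []) c "")
        aStep parts t) []
      cols ++ [PySem.Str.join " / " parts]) []

-- ===== PORT B =====
-- B's per-cell state update: state = (composed string so far, last kept token)
def bCell (st : String × String) (cell : String) : String × String :=
  let t := PySem.Str.strip cell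
  if t ≠ "" ∧ t ≠ st.2 then ((if st.1 = "" then t else st.1 ++ " / " ++ t), t) else st

def compose_columns_py_alt (header_grid : List (List String)) : List String :=
  if header_grid = [] then []
  else
    (header_grid.foldl (fun state row => List.zipWith bCell state row)
      (List.replicate (header_grid.headD []).length ("", ""))).map Prod.fst

-- ===== PRECONDITION & SPEC =====
-- Pre_ excludes exactly the ragged grids on which A raises IndexError (a row shorter than the first row).
def Pre_compose_columns_py (header_grid : List (List String)) : Prop :=
  ∀ row ∈ header_grid, (header_grid.headD []).length ≤ row.length
instance (header_grid : List (List String)) : Decidable (Pre_compose_columns_py header_grid) := by unfold Pre_compose_columns_py; infer_instance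

def pvWitness_compose_columns_py : List (List String) := [["a", ""], [" a ", "b"], ["c", "b"]]

def Spec_compose_columns_py (header_grid : List (List String)) (out : List String) : Prop := out = compose_columns_py_alt header_grid
instance (header_grid : List (List String)) (out : List String) : Decidable (Spec_compose_columns_py header_grid out) := by unfold Spec_compose_columns_py; infer_instance

-- ===== CLAIM (what is proved, stated in full; the proofs are below) =====
def Claim_equal_compose_columns_py : Prop := ∀ (header_grid : List (List String)), Dom_compose_columns_py header_grid → Pre_compose_columns_py header_grid → Spec_compose_columns_py header_grid (compose_columns_py header_grid)

-- ===== LEMMAS AND PROOFS =====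

theorem str_join_nil (sep : String) : PySem.Str.join sep [] = "" := by
  apply String.toList_inj.mp
  simp [PySem.Str.toList_join, PySem.Chars.join_nil]

-- " / ".join(ps ++ [t]) built incrementally
theorem chars_join_append (sep y : List Char) :
    ∀ (xs : List (List Char)), xs ≠ [] →
      PySem.Chars.join sep (xs ++ [y]) = PySem.Chars.join sep xs ++ sep ++ y := by
  intro xs
  induction xs with
  | nil => intro h; exact absurd rfl h
  | cons x xs ih =>
    intro _
    cases xs with
    | nil => simp [PySem.Chars.join_cons_cons, PySem.Chars.join_singleton]
    | cons q qs =>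
      simp only [List.cons_append]
      rw [PySem.Chars.join_cons_cons,
        show q :: (qs ++ [y]) = (q :: qs) ++ [y] from rfl, ih (by simp),
        PySem.Chars.join_cons_cons]
      simp [List.append_assoc]

theorem str_join_append (sep : String) (ps : List String) (t : String) (h : ps ≠ []) :
    PySem.Str.join sep (ps ++ [t]) = PySem.Str.join sep ps ++ sep ++ t := by
  apply String.toList_inj.mp
  simp only [PySem.Str.toList_join, List.map_append, List.map_cons, List.map_nil,
    String.toList_append]
  exact chars_join_append sep.toList t.toList (ps.map String.toList) (by simpa using h)

-- join of a nonempty list of nonempty strings is nonempty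
theorem str_join_ne_empty (ps : List String) (hne : ps ≠ []) (h : "" ∉ ps) :
    PySem.Str.join " / " ps ≠ "" := by
  intro hc
  have : (PySem.Str.join " / " ps).toList = [] := by rw [hc]; rfl
  rw [PySem.Str.toList_join] at this
  cases ps with
  | nil => exact hne rfl
  | cons p qs =>
    cases qs with
    | nil =>
      rw [List.map_cons, List.map_nil, PySem.Chars.join_singleton] at this
      exact h (by simp [show p = "" from String.toList_inj.mp (by simp [this])])
    | cons q rs =>
      rw [List.map_cons, List.map_cons, PySem.Chars.join_cons_cons] at this
      simp at this

-- core correspondence: B's streaming (acc, last) state tracks A's parts list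
theorem bCell_fold (ts : List String) : ∀ (parts : List String), "" ∉ parts →
    ts.foldl bCell (PySem.Str.join " / " parts, parts.getLast?.getD "") =
      (PySem.Str.join " / " ((ts.map PySem.Str.strip).foldl aStep parts),
       ((ts.map PySem.Str.strip).foldl aStep parts).getLast?.getD "") := by
  induction ts with
  | nil => intro parts _; simp
  | cons s ts ih =>
    intro parts hp
    simp only [List.foldl_cons, List.map_cons]
    set t := PySem.Str.strip s with ht
    by_cases h0 : t = ""
    · have hb : bCell (PySem.Str.join " / " parts, parts.getLast?.getD "") s =
          (PySem.Str.join " / " parts, parts.getLast?.getD "") := by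
        simp [bCell, ← ht, h0]
      have ha : aStep parts t = parts := by simp [aStep, h0]
      rw [hb, ha, ih parts hp]
    · by_cases hl : parts.getLast?.getD "" = t
      · -- t equals the last kept token: both sides skip
        have hne : parts ≠ [] := by
          intro h; rw [h] at hl; simp at hl; exact h0 hl
        have hlast : parts.getLast hne = t := by
          rw [List.getLast?_eq_some_getLast hne] at hl; simpa using hl
        have hb : bCell (PySem.Str.join " / " parts, parts.getLast?.getD "") s =
            (PySem.Str.join " / " parts, parts.getLast?.getD "") := by
          simp [bCell, ← ht, hl]
        have ha : aStep parts t = parts := by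
          simp [aStep, h0, hne, PySem.List.pyGetD_neg_one parts "" hne, hlast]
        rw [hb, ha, ih parts hp]
      · -- t is a new token: both sides append
        have ha : aStep parts t = parts ++ [t] := by
          rcases Decidable.em (parts = []) with h | h
          · simp [aStep, h0, h]
          · have hlast : parts.getLast h ≠ t := by
              intro he
              exact hl (by rw [List.getLast?_eq_some_getLast h, he]; rfl)
            simp [aStep, h0, h, PySem.List.pyGetD_neg_one parts "" h, hlast]
        have hjoin : PySem.Str.join " / " (parts ++ [t]) =
            (if PySem.Str.join " / " parts = "" then t
             else PySem.Str.join " / " parts ++ " / " ++ t) := by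
          rcases Decidable.em (parts = []) with h | h
          · subst h
            rw [str_join_nil, if_pos rfl, List.nil_append]
            apply String.toList_inj.mp
            simp [PySem.Str.toList_join, PySem.Chars.join_singleton]
          · rw [if_neg (str_join_ne_empty parts h hp), str_join_append _ _ _ h]
        have hb : bCell (PySem.Str.join " / " parts, parts.getLast?.getD "") s =
            (PySem.Str.join " / " (parts ++ [t]), (parts ++ [t]).getLast?.getD "") := by
          simp only [bCell, ← ht]
          rw [if_pos ⟨h0, fun he => hl he.symm⟩, hjoin]
          simp
        rw [hb, ha]
        have hp' : "" ∉ parts ++ [t] := by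
          simp only [List.mem_append, List.mem_singleton]
          rintro (hq | hq)
          · exact hp hq
          · exact h0 hq.symm
        have := ih (parts ++ [t]) hp'
        rw [this]

-- folding zipWith bCell over the rows computes each column's fold independently
theorem fold_zipWith (grid : List (List String)) :
    ∀ (st : List (String × String)), (∀ row ∈ grid, st.length ≤ row.length) →
    grid.foldl (fun s row => List.zipWith bCell s row) st
      = (List.range st.length).map
          (fun c => grid.foldl (fun p row => bCell p (row.getD c "")) (st.getD c ("", ""))) := by
  induction grid with
  | nil =>
    intro st _
    simp only [List.foldl_nil]
    apply List.ext_getElem (by simp)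
    intro i hi hi'
    simp [List.getD_eq_getElem?_getD, List.getElem?_eq_getElem (by simpa using hi')]
  | cons r grid ih =>
    intro st hlen
    have hr : st.length ≤ r.length := hlen r (by simp)
    have hzl : (List.zipWith bCell st r).length = st.length := by
      simp [List.length_zipWith]; omega
    simp only [List.foldl_cons]
    rw [ih (List.zipWith bCell st r)
        (fun row hrow => hzl ▸ hlen row (by simp [hrow])), hzl]
    apply List.map_congr_left
    intro c hc
    have hcn : c < st.length := List.mem_range.mp hc
    have h1 : (List.zipWith bCell st r).getD c ("", "") = bCell (st.getD c ("", "")) (r.getD c "") := by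
      simp only [List.getD_eq_getElem?_getD]
      rw [List.getElem?_eq_getElem (show c < (List.zipWith bCell st r).length by omega),
        List.getElem_zipWith, List.getElem?_eq_getElem hcn,
        List.getElem?_eq_getElem (show c < r.length by omega)]
      rfl
    rw [h1]

-- ===== VERDICT (by name: the statement is the Claim_ definition above) =====
theorem compose_columns_py_spec : Claim_equal_compose_columns_py := by
  intro grid _ hpre
  unfold Spec_compose_columns_py compose_columns_py compose_columns_py_alt
  by_cases hg : grid = []
  · simp [hg]
  · simp only [hg, if_false]
    rw [fold_zipWith grid _ (by intro row hr; simpa using hpre row hr), List.length_replicate]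
    rw [PySem.List.foldl_append_singleton_eq_map, List.nil_append]
    rw [PySem.List.pyRange_zero_natCast (grid.headD []).length]
    simp only [List.map_map]
    apply List.map_congr_left
    intro c _
    simp only [Function.comp_apply]
    rw [PySem.List.foldl_pyRange_zero_pyGetD' grid []
      (fun parts row => aStep parts (PySem.Str.strip (PySem.List.pyGetD row (c : Int) ""))) []]
    have hB : grid.foldl (fun p row => bCell p (row.getD c "")) ((List.replicate (grid.headD []).length ("", "")).getD c ("", ""))
        = (grid.map (fun row => row.getD c "")).foldl bCell ("", "") := by
      rw [List.foldl_map]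
      congr 1
      rcases Decidable.em (c < (grid.headD []).length) with h | h
      · simp [List.getD_eq_getElem?_getD]
      · simp [List.getD_eq_getElem?_getD]
    rw [hB]
    have h0 : (("" : String), ("" : String)) =
        (PySem.Str.join " / " ([] : List String), ([] : List String).getLast?.getD "") := by
      simp [str_join_nil]
    rw [h0, bCell_fold _ [] (by simp)]
    simp only [List.map_map]
    have hmap : List.map (PySem.Str.strip ∘ fun row => row.getD c "") grid
        = grid.map (fun row => PySem.Str.strip (PySem.List.pyGetD row (c : Int) "")) := by
      apply List.map_congr_left
      intro row _
      simp [Function.comp, PySem.List.pyGetD_natCast]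
    rw [hmap, List.foldl_map]
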